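-- pv_equiv track=rewrite | github.com/yazhsab/slms-separator-local-magic | benchmarks/generate_tree_resource_network.py | balanced_tree
-- ===== SOURCE A (Python) =====
-- def balanced_tree(n):
--     parents = {0: None}
--     next_id = 1
--     queue = [0]
--     while next_id < n and queue:
--         node = queue.pop(0)
--         for _ in range(2):
--             if next_id >= n:
--                 break
--             parents[next_id] = node
--             queue.append(next_id)
--             next_id += 1
--     return parents
-- ===== SOURCE B (Python) =====
-- def balanced_tree(n):
--     # Heap-numbering closed form: node i's parent is (i - 1) // 2.
--     parents = {0: None}
--     for i in range(1, n):
--         parents[i] = (i - 1) // 2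
--     return parents
-- ===== Notes on version B (the rewrite author's own statement) =====
-- stated objective: faster
-- what changed: Replaces the BFS queue simulation (with O(n) list.pop(0) per node) by the closed-form heap-numbering rule parent(i) = (i-1)//2 in a single pass.
import Mathlib
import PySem

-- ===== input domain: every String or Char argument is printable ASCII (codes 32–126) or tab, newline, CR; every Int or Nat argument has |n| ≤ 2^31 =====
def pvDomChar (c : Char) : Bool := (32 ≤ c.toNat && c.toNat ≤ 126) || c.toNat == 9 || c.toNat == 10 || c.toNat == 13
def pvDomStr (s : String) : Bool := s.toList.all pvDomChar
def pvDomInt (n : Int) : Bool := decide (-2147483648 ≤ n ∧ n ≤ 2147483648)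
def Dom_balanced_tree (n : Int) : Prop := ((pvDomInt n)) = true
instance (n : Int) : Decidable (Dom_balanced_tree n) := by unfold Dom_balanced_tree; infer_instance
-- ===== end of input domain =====

-- B replaces A's BFS queue simulation by the closed-form heap rule parent(i) = (i-1)//2 in one pass (faster).

-- ===== PORT A =====
-- the while loop of A; the inner two-child for loop with its break is written as the two
-- guarded steps (the first guard next_id < n already holds on entry; once next_id ≥ n it
-- stays, so the guarded second step is exactly the break)
def btLoopA (n : Int) (parents : PySem.Dict Int (Option Int)) (next_id : Int)
    (queue : List Int) : PySem.Dict Int (Option Int) :=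
  if _h : next_id < n then
    match queue with
    | [] => parents
    | node :: rest =>                                   -- node = queue.pop(0)
      let p1 := parents.insert next_id (some node)
      let q1 := rest ++ [next_id]
      let i1 := next_id + 1
      if i1 < n then
        btLoopA n (p1.insert i1 (some node)) (i1 + 1) (q1 ++ [i1])
      else p1
  else parents
termination_by (n - next_id).toNat
decreasing_by omega

def balanced_tree (n : Int) : List (Int × Option Int) :=
  (btLoopA n (PySem.Dict.ofList [((0 : Int), (none : Option Int))]) 1 [0]).items

-- ===== PORT B =====
def balanced_tree_alt (n : Int) : List (Int × Option Int) :=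
  ((PySem.List.pyRange 1 n 1).foldl
      (fun d i => d.insert i (some (PySem.Int.floordiv (i - 1) 2)))
      (PySem.Dict.ofList [((0 : Int), (none : Option Int))])).items

-- ===== PRECONDITION & SPEC =====
def Spec_balanced_tree (n : Int) (out : List (Int × Option Int)) : Prop := out = balanced_tree_alt n
instance (n : Int) (out : List (Int × Option Int)) : Decidable (Spec_balanced_tree n out) := by unfold Spec_balanced_tree; infer_instance

-- ===== CLAIM (what is proved, stated in full; the proofs are below) =====
def Claim_equal_balanced_tree : Prop := ∀ (n : Int), Dom_balanced_tree n → Spec_balanced_tree n (balanced_tree n)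

-- ===== LEMMAS AND PROOFS =====

-- B's fold inserts only fresh pairwise-distinct keys ≥ 1, so its items list appends in order
lemma alt_items (n : Int) :
    balanced_tree_alt n
      = ((0 : Int), (none : Option Int))
          :: (PySem.List.pyRange 1 n 1).map
              (fun i => (i, some (PySem.Int.floordiv (i - 1) 2))) := by
  unfold balanced_tree_alt
  have h1 : ∀ a ∈ PySem.List.pyRange 1 n 1,
      (PySem.Dict.ofList [((0 : Int), (none : Option Int))]).contains ((fun i => i) a) = false := by
    intro a ha
    have := (PySem.List.mem_pyRange_one).mp ha
    rw [show PySem.Dict.ofList [((0:Int),(none:Option Int))]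
        = PySem.Dict.mk [((0:Int),(none:Option Int))] from rfl]
    simp [PySem.Dict.contains_mk]
    omega
  have h2 : ((PySem.List.pyRange 1 n 1).map (fun (i : Int) => i)).Nodup := by
    simpa using PySem.List.nodup_pyRange_one (a := 1) (b := n)
  have h := PySem.Dict.items_foldl_insert_fresh (PySem.List.pyRange 1 n 1) (fun (i : Int) => i)
      (fun i => some (PySem.Int.floordiv (i - 1) 2))
      (PySem.Dict.ofList [((0 : Int), (none : Option Int))]) h1 h2
  simpa using h

lemma floordiv_two_mul (q : Int) : PySem.Int.floordiv (2 * q) 2 = q := by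
  rw [PySem.Int.floordiv_eq_ediv_of_pos (by omega)]
  omega

lemma floordiv_two_odd (q : Int) : PySem.Int.floordiv (2 * q + 1) 2 = q := by
  rw [PySem.Int.floordiv_eq_ediv_of_pos (by omega)]
  omega

-- the loop invariant of A: at every state the loop reaches, next_id = 2q+1, the queue is
-- [q, …, 2q], and parents has no key ≥ 2q+1; the loop then appends exactly the heap-rule pairs
lemma btLoopA_items (n : Int) : ∀ (m : Nat) (q : Int) (P : PySem.Dict Int (Option Int)),
    0 ≤ q → (n - (2 * q + 1)).toNat ≤ m →
    (∀ i : Int, 2 * q + 1 ≤ i → P.contains i = false) →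
    (btLoopA n P (2 * q + 1) (PySem.List.pyRange q (2 * q + 1) 1)).items
      = P.items ++ (PySem.List.pyRange (2 * q + 1) n 1).map
          (fun i => (i, some (PySem.Int.floordiv (i - 1) 2))) := by
  intro m
  induction m with
  | zero =>
    intro q P hq hm _hP
    rw [btLoopA.eq_def, dif_neg (by omega), PySem.List.pyRange_one_eq_nil (by omega)]
    simp
  | succ m ih =>
    intro q P hq hm hP
    by_cases hlt : 2 * q + 1 < n
    · rw [PySem.List.pyRange_one_cons (show q < 2 * q + 1 by omega)]
      rw [btLoopA.eq_def, dif_pos hlt]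
      simp only
      by_cases h2 : 2 * q + 1 + 1 < n
      · rw [if_pos h2]
        have hqueue : (PySem.List.pyRange (q + 1) (2 * q + 1) 1 ++ [2 * q + 1]) ++ [2 * q + 1 + 1]
            = PySem.List.pyRange (q + 1) (2 * (q + 1) + 1) 1 := by
          conv_rhs => rw [show 2 * (q + 1) + 1 = (2 * q + 1 + 1) + 1 by ring,
              PySem.List.pyRange_one_succ_right (show q + 1 ≤ 2 * q + 1 + 1 by omega),
              show (2 * q + 1 + 1 : Int) = (2 * q + 1) + 1 by ring,
              PySem.List.pyRange_one_succ_right (show q + 1 ≤ 2 * q + 1 by omega)]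
        have hstep : (2 * q + 1 + 1 + 1 : Int) = 2 * (q + 1) + 1 := by ring
        have hc1 : P.contains (2 * q + 1) = false := hP _ (by omega)
        have hc2 : (P.insert (2 * q + 1) (some q)).contains (2 * q + 1 + 1) = false := by
          rw [PySem.Dict.contains_insert, hP _ (by omega)]
          simp
        have hfresh : ∀ i : Int, 2 * (q + 1) + 1 ≤ i →
            ((P.insert (2 * q + 1) (some q)).insert (2 * q + 1 + 1) (some q)).contains i = false := by
          intro i hi
          rw [PySem.Dict.contains_insert, PySem.Dict.contains_insert, hP i (by omega)]
          simp; omega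
        rw [hqueue, hstep, ih (q + 1) _ (by omega) (by omega) hfresh,
            PySem.Dict.items_insert_of_not_contains (h := hc2),
            PySem.Dict.items_insert_of_not_contains (h := hc1)]
        conv_rhs => rw [PySem.List.pyRange_one_cons (show 2 * q + 1 < n by omega),
            PySem.List.pyRange_one_cons (show 2 * q + 1 + 1 < n by omega), hstep]
        simp only [List.map_cons, List.append_assoc, List.cons_append, List.nil_append]
        congr 2
        · congr 1
          rw [show (2 * q + 1 - 1 : Int) = 2 * q by ring, floordiv_two_mul]
        · congr 2
          rw [show (2 * q + 1 + 1 - 1 : Int) = 2 * q + 1 by ring, floordiv_two_odd]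
      · rw [if_neg h2,
            PySem.Dict.items_insert_of_not_contains (h := hP _ (by omega))]
        conv_rhs => rw [show n = (2 * q + 1) + 1 by omega]
        rw [PySem.List.pyRange_one_singleton]
        simp only [List.map_cons, List.map_nil]
        congr 3
        rw [show (2 * q + 1 - 1 : Int) = 2 * q by ring, floordiv_two_mul]
    · rw [btLoopA.eq_def, dif_neg hlt, PySem.List.pyRange_one_eq_nil (by omega)]
      simp

-- ===== VERDICT (by name: the statement is the Claim_ definition above) =====
theorem balanced_tree_spec : Claim_equal_balanced_tree := by
  intro n _hd
  unfold Spec_balanced_tree balanced_tree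
  have hfresh : ∀ i : Int, 2 * 0 + 1 ≤ i →
      (PySem.Dict.ofList [((0 : Int), (none : Option Int))]).contains i = false := by
    intro i hi
    rw [show PySem.Dict.ofList [((0:Int),(none:Option Int))]
        = PySem.Dict.mk [((0:Int),(none:Option Int))] from rfl]
    simp [PySem.Dict.contains_mk]
    omega
  have h := btLoopA_items n (n - 1).toNat 0
      (PySem.Dict.ofList [((0 : Int), (none : Option Int))]) le_rfl (by omega) hfresh
  rw [show (2 * 0 + 1 : Int) = 1 from by norm_num] at h
  rw [show PySem.List.pyRange 0 1 1 = [0] from PySem.List.pyRange_one_singleton 0] at h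
  rw [alt_items]
  exact h.trans (by rfl)
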